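-- pv_equiv track=rewrite | github.com/Cybergenik/AoC | 2023/day18/part2.py | find_dims
-- ===== SOURCE A (Python) =====
-- def find_dims(trench):
--     Sx = 0
--     Sy = 0
--     Ex = 0
--     Ey = 0
--     for x, y in trench:
--         if x < Sx:
--             Sx = x
--         if y < Sy:
--             Sy = y
--         if y > Ey:
--             Ey = y
--         if x > Ex:
--             Ex = x
--     return (Sx, Ex+1), (Sy, Ey+1)
-- ===== SOURCE B (Python) =====
-- def find_dims(trench):
--     xs = [x for x, _ in trench]
--     ys = [y for _, y in trench]
--     Sx = min(xs + [0])
--     Ex = max(xs + [0])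
--     Sy = min(ys + [0])
--     Ey = max(ys + [0])
--     return (Sx, Ex + 1), (Sy, Ey + 1)
-- ===== Notes on version B (the rewrite author's own statement) =====
-- stated objective: idiomatic
-- what changed: Replaces the single fused comparison loop maintaining four running extrema with per-axis built-in min/max reductions over materialised coordinate lists, folding 0 in to keep the origin baseline.
import Mathlib
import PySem

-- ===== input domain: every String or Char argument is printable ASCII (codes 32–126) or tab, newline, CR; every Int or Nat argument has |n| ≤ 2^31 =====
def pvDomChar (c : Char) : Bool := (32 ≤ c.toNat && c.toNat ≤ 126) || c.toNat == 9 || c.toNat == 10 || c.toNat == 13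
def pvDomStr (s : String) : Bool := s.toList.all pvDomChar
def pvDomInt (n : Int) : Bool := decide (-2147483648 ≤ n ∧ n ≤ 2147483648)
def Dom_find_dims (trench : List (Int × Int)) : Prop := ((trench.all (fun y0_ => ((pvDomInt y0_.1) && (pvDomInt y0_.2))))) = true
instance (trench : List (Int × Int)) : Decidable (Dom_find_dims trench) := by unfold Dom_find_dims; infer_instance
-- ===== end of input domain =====

-- B replaces A's fused four-way comparison loop by per-axis min/max reductions over
-- materialised coordinate lists (0 folded in to keep the origin baseline); same cost, plainer.

-- ===== PORT A =====
def find_dims (trench : List (Int × Int)) : (Int × Int) × (Int × Int) :=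
  let r := trench.foldl (fun (s : Int × Int × Int × Int) xy =>
    let Sx := if xy.1 < s.1 then xy.1 else s.1
    let Sy := if xy.2 < s.2.1 then xy.2 else s.2.1
    let Ey := if xy.2 > s.2.2.2 then xy.2 else s.2.2.2
    let Ex := if xy.1 > s.2.2.1 then xy.1 else s.2.2.1
    (Sx, Sy, Ex, Ey)) (0, 0, 0, 0)
  ((r.1, r.2.2.1 + 1), (r.2.1, r.2.2.2 + 1))

-- ===== PORT B =====
-- min/max over a list that always contains 0, so the option is always `some`; `.getD 0` only discharges that.
def find_dims_alt (trench : List (Int × Int)) : (Int × Int) × (Int × Int) :=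
  let xs := trench.map Prod.fst
  let ys := trench.map Prod.snd
  let Sx := (PySem.List.min? (xs ++ [0]) (fun v => v)).getD 0
  let Ex := (PySem.List.max? (xs ++ [0]) (fun v => v)).getD 0
  let Sy := (PySem.List.min? (ys ++ [0]) (fun v => v)).getD 0
  let Ey := (PySem.List.max? (ys ++ [0]) (fun v => v)).getD 0
  ((Sx, Ex + 1), (Sy, Ey + 1))

-- ===== PRECONDITION & SPEC =====
def Spec_find_dims (trench : List (Int × Int)) (out : (Int × Int) × (Int × Int)) : Prop := out = find_dims_alt trench
instance (trench : List (Int × Int)) (out : (Int × Int) × (Int × Int)) : Decidable (Spec_find_dims trench out) := by unfold Spec_find_dims; infer_instance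

-- ===== CLAIM (what is proved, stated in full; the proofs are below) =====
def Claim_equal_find_dims : Prop := ∀ (trench : List (Int × Int)), Dom_find_dims trench → Spec_find_dims trench (find_dims trench)

-- ===== LEMMAS AND PROOFS =====

theorem pv_if_lt_min (a b : Int) : (if b < a then b else a) = min a b := by omega
theorem pv_if_gt_max (a b : Int) : (if b > a then b else a) = max a b := by omega

theorem pv_foldl_min_min (l : List Int) (a b : Int) :
    l.foldl min (min a b) = min a (l.foldl min b) := by
  induction l generalizing b with
  | nil => rfl
  | cons c t ih => simp only [List.foldl_cons, min_assoc, ih]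

theorem pv_foldl_max_max (l : List Int) (a b : Int) :
    l.foldl max (max a b) = max a (l.foldl max b) := by
  induction l generalizing b with
  | nil => rfl
  | cons c t ih => simp only [List.foldl_cons, max_assoc, ih]

theorem pv_loopA (l : List (Int × Int)) (Sx Sy Ex Ey : Int) :
    l.foldl (fun (s : Int × Int × Int × Int) xy =>
      let Sx := if xy.1 < s.1 then xy.1 else s.1
      let Sy := if xy.2 < s.2.1 then xy.2 else s.2.1
      let Ey := if xy.2 > s.2.2.2 then xy.2 else s.2.2.2
      let Ex := if xy.1 > s.2.2.1 then xy.1 else s.2.2.1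
      (Sx, Sy, Ex, Ey)) (Sx, Sy, Ex, Ey) =
    ((l.map Prod.fst).foldl min Sx, (l.map Prod.snd).foldl min Sy,
     (l.map Prod.fst).foldl max Ex, (l.map Prod.snd).foldl max Ey) := by
  induction l generalizing Sx Sy Ex Ey with
  | nil => rfl
  | cons p t ih =>
    simp only [List.foldl_cons, List.map_cons]
    rw [ih]
    simp only [pv_if_lt_min, pv_if_gt_max]

-- ===== VERDICT (by name: the statement is the Claim_ definition above) =====
theorem find_dims_spec : Claim_equal_find_dims := by
  intro trench _
  unfold Spec_find_dims find_dims find_dims_alt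
  simp only [pv_loopA]
  cases trench with
  | nil => decide
  | cons p t =>
    simp only [List.map_cons, List.cons_append, PySem.List.min?_id_cons, PySem.List.max?_id_cons,
      List.foldl_append, List.foldl_cons, List.foldl_nil, Option.getD_some,
      pv_foldl_min_min, pv_foldl_max_max, Prod.mk.injEq]
    refine ⟨⟨?_, ?_⟩, ?_, ?_⟩ <;> omega
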